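-- pv_equiv track=rewrite | github.com/Jean-Bertholat/EyeDetection | IA_LED_v1.py | getAreas
-- ===== SOURCE A (Python) =====
-- def getAreas(x, y, xAreas, yAreas):
--
--     X = [0]
--     Y = [0]
--
--     for i in range (xAreas) :
--         X.append(X[i] + x//(xAreas))
--
--     for i in range (yAreas) :
--         Y.append(Y[i] + y//(yAreas))
--
--     return X, Y
-- ===== SOURCE B (Python) =====
-- def getAreas(x, y, xAreas, yAreas):
--     X = [0] + [(i + 1) * (x // xAreas) for i in range(xAreas)]
--     Y = [0] + [(i + 1) * (y // yAreas) for i in range(yAreas)]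
--     return X, Y
-- ===== Notes on version B (the rewrite author's own statement) =====
-- stated objective: simpler
-- what changed: Replaces the stateful accumulation that reads the previous list element with a closed-form per-index formula (i+1)*(x//xAreas), eliminating the mutable prefix-sum state.
import Mathlib
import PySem

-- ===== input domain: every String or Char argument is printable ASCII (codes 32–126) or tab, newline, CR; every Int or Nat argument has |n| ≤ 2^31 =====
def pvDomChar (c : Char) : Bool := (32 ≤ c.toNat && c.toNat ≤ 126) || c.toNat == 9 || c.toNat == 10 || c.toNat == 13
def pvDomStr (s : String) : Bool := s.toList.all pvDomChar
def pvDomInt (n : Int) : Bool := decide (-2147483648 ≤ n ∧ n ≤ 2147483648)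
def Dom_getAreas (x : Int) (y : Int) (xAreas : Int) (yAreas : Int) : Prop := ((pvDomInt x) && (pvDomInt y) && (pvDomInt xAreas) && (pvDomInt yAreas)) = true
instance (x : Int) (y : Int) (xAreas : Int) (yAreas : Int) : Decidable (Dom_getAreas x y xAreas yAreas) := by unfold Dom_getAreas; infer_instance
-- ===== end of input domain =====

-- B replaces the stateful prefix-sum accumulation (each entry read back from the
-- list being built) with a closed-form per-index formula; objective: simpler.

-- ===== PORT A =====
-- X[i] is always in range when read, so pyGet?'s none branch is dead; .getD 0 only totalizes it.
def getAreas (x : Int) (y : Int) (xAreas : Int) (yAreas : Int) : List Int × List Int :=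
  let X := (PySem.List.pyRange 0 xAreas 1).foldl
    (fun X i => X ++ [(PySem.List.pyGet? X i).getD 0 + PySem.Int.floordiv x xAreas]) [0]
  let Y := (PySem.List.pyRange 0 yAreas 1).foldl
    (fun Y i => Y ++ [(PySem.List.pyGet? Y i).getD 0 + PySem.Int.floordiv y yAreas]) [0]
  (X, Y)

-- ===== PORT B =====
def getAreas_alt (x : Int) (y : Int) (xAreas : Int) (yAreas : Int) : List Int × List Int :=
  (0 :: (PySem.List.pyRange 0 xAreas 1).map (fun i => (i + 1) * PySem.Int.floordiv x xAreas),
   0 :: (PySem.List.pyRange 0 yAreas 1).map (fun i => (i + 1) * PySem.Int.floordiv y yAreas))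

-- ===== PRECONDITION & SPEC =====
def Spec_getAreas (x : Int) (y : Int) (xAreas : Int) (yAreas : Int) (out : List Int × List Int) : Prop := out = getAreas_alt x y xAreas yAreas
instance (x : Int) (y : Int) (xAreas : Int) (yAreas : Int) (out : List Int × List Int) : Decidable (Spec_getAreas x y xAreas yAreas out) := by unfold Spec_getAreas; infer_instance

-- ===== CLAIM (what is proved, stated in full; the proofs are below) =====
def Claim_equal_getAreas : Prop := ∀ (x : Int) (y : Int) (xAreas : Int) (yAreas : Int), Dom_getAreas x y xAreas yAreas → Spec_getAreas x y xAreas yAreas (getAreas x y xAreas yAreas)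

-- ===== LEMMAS AND PROOFS =====

-- A's loop over range(n) builds exactly the multiples 0, s, 2s, …, ns.
theorem foldA_eq (s : Int) (n : Nat) :
    (PySem.List.pyRange 0 (n : Int) 1).foldl
      (fun X i => X ++ [(PySem.List.pyGet? X i).getD 0 + s]) [0] =
    (List.range (n + 1)).map (fun k : Nat => (k : Int) * s) := by
  induction n with
  | zero => simp [PySem.List.pyRange_one_eq_nil]
  | succ n ih =>
    have h1 : ((n : Int) + 1) = ((n + 1 : Nat) : Int) := by push_cast; ring
    have hsr : PySem.List.pyRange 0 ((n + 1 : Nat) : Int) 1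
        = PySem.List.pyRange 0 (n : Int) 1 ++ [(n : Int)] := by
      rw [← h1, PySem.List.pyRange_one_succ_right (by exact_mod_cast Nat.zero_le n)]
    rw [hsr, List.foldl_append, ih]
    have hget : (PySem.List.pyGet? ((List.range (n + 1)).map (fun k : Nat => (k : Int) * s)) (n : Int)).getD 0
        = (n : Int) * s := by
      rw [PySem.List.pyGet?_natCast, List.getElem?_map,
        List.getElem?_range (Nat.lt_succ_self n)]
      rfl
    simp only [List.foldl_cons, List.foldl_nil, hget]
    rw [List.range_succ (n := n + 1)]
    simp [List.map_append]
    ring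
  
-- B's closed form equals those same multiples.
theorem mapB_eq (s : Int) (n : Nat) :
    0 :: (PySem.List.pyRange 0 (n : Int) 1).map (fun i => (i + 1) * s) =
    (List.range (n + 1)).map (fun k : Nat => (k : Int) * s) := by
  rw [PySem.List.pyRange_zero_natCast, List.range_succ_eq_map]
  have hf : ∀ a ∈ List.range n,
      ((fun i : Int => (i + 1) * s) ∘ (fun k : Nat => (k : Int))) a
        = ((fun k : Nat => (k : Int) * s) ∘ Nat.succ) a := by
    intro k _
    simp only [Function.comp_apply]
    push_cast
    ring
  simp only [List.map_cons, List.map_map]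
  rw [List.map_congr_left hf]
  norm_num

theorem axis_eq (v m : Int) :
    (PySem.List.pyRange 0 m 1).foldl
      (fun X i => X ++ [(PySem.List.pyGet? X i).getD 0 + PySem.Int.floordiv v m]) [0] =
    0 :: (PySem.List.pyRange 0 m 1).map (fun i => (i + 1) * PySem.Int.floordiv v m) := by
  rcases le_or_gt m 0 with hm | hm
  · rw [PySem.List.pyRange_one_eq_nil hm]; rfl
  · obtain ⟨n, rfl⟩ : ∃ n : Nat, m = (n : Int) :=
      ⟨m.toNat, (Int.toNat_of_nonneg hm.le).symm⟩
    rw [foldA_eq, mapB_eq]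

-- ===== VERDICT (by name: the statement is the Claim_ definition above) =====
theorem getAreas_spec : Claim_equal_getAreas := by
  intro x y xAreas yAreas _
  unfold Spec_getAreas getAreas getAreas_alt
  simp only []
  rw [axis_eq, axis_eq]
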